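-- pv_equiv track=rewrite | github.com/priyanshu528priya/PLANNER | PLANNER/rlutils.py | get_predicted_strategy
-- ===== SOURCE A (Python) =====
-- def get_predicted_strategy(sent3,role_id):
--
--     tourist_strategy = {'problem-solving':0, 'strategic-proposal':1, 'firm-pricing':2, 'definitive-decision-making':3,'collaborative-proposal':4 ,'flexible-pricing':5, 'co-operative-decision-making':6, 'no-strategy':7}
--     agent_strategy = {'problem-solving':0, 'strategic-proposal':1, 'firm-pricing':2, 'definitive-decision-making':3,'collaborative-proposal':4 ,'flexible-pricing':5, 'co-operative-decision-making':6, 'no-strategy':7}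
--
--     indx = sent3.find('next')
--     sent3 = sent3[indx:]
--     sent = sent3.lower()
--     sent = sent.split(' ')
--     sent = [k.strip() for k in sent]
--     sent.reverse()
--     Flag = False
--     if role_id==0:
--         key_li = tourist_strategy.keys()
--     else:
--         key_li = agent_strategy.keys()
--     strategy = 'NA'
--     key_li = [ele.lower() for ele in key_li]
--     for ele in sent:
--       for k in key_li:
--         if k in ele:
--           Flag = True
--           el_len = len(ele.split('_'))
--           k_len = len(k.split('_'))
--           if k_len == el_len:
--             Flag = True
--             strategy = k
--             break
--
--
--       if Flag == True:
--         break
--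
--     return strategy
-- ===== SOURCE B (Python) =====
-- def get_predicted_strategy(sent3, role_id):
--     keys = ['problem-solving', 'strategic-proposal', 'firm-pricing',
--             'definitive-decision-making', 'collaborative-proposal',
--             'flexible-pricing', 'co-operative-decision-making', 'no-strategy']
--     words = [w.strip() for w in sent3[sent3.find('next'):].lower().split(' ')]
--     result = 'NA'
--     for w in words:
--         if any(k in w for k in keys):
--             result = next((k for k in keys
--                            if k in w and len(k.split('_')) == len(w.split('_'))), 'NA')
--     return result
-- ===== Notes on version B (the rewrite author's own statement) =====
-- stated objective: simpler
-- what changed: B drops A's role_id dict split, list reversal, Flag variable and double break, replacing the reverse-scan-with-early-exit by one forward fold that overwrites an accumulator on each word containing a strategy key (the last matching word wins).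
import Mathlib
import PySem

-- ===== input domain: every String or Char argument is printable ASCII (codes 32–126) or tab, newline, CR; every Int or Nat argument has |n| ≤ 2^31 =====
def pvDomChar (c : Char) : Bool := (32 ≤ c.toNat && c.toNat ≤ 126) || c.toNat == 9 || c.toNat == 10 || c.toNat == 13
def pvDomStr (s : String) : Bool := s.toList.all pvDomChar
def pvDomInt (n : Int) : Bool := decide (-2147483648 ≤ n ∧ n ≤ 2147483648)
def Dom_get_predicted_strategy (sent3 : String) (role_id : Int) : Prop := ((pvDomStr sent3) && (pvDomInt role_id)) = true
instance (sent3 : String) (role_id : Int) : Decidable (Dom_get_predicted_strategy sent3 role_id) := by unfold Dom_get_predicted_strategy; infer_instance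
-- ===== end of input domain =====

-- B replaces A's reverse + Flag + double break with a single forward pass keeping the last
-- matching word's answer in an accumulator (objective: simpler; same linear cost).

-- ===== PORT A =====
-- the two strategy dicts of A (insertion order; only the keys are ever used)
def pvTouristStrategy : List (String × Int) :=
  [("problem-solving", 0), ("strategic-proposal", 1), ("firm-pricing", 2),
   ("definitive-decision-making", 3), ("collaborative-proposal", 4),
   ("flexible-pricing", 5), ("co-operative-decision-making", 6), ("no-strategy", 7)]
def pvAgentStrategy : List (String × Int) := pvTouristStrategy

-- A's inner 'for k in key_li' loop: threads Flag; returns (Flag, the key the break set, if any)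
def pvInnerA (ele : String) (flag : Bool) : List String → Bool × Option String
  | [] => (flag, none)
  | k :: ks =>
      if PySem.Str.isIn k ele then
        if ((PySem.Str.split? k "_").getD []).length = ((PySem.Str.split? ele "_").getD []).length then
          (true, some k)
        else pvInnerA ele true ks
      else pvInnerA ele flag ks

-- A's outer 'for ele in sent' loop: updates strategy on an inner break, stops when Flag is set
def pvOuterA (keys : List String) (flag : Bool) (strategy : String) : List String → String
  | [] => strategy
  | ele :: rest =>
      let r := pvInnerA ele flag keys
      let strategy' := match r.2 with | some k => k | none => strategy
      if r.1 then strategy' else pvOuterA keys r.1 strategy' rest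

def get_predicted_strategy (sent3 : String) (role_id : Int) : String :=
  let indx := PySem.Str.find sent3 "next"
  let sent3' := PySem.Str.slice sent3 (some indx) none
  let sent := PySem.Str.lower sent3'
  let sentL := (PySem.Str.split? sent " ").getD []
  let sentL := sentL.map PySem.Str.strip
  let sentR := sentL.reverse
  let key_li := if role_id == 0 then pvTouristStrategy.map Prod.fst else pvAgentStrategy.map Prod.fst
  let key_li := key_li.map PySem.Str.lower
  pvOuterA key_li false "NA" sentR

-- ===== PORT B =====
def pvKeysB : List String :=
  ["problem-solving", "strategic-proposal", "firm-pricing",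
   "definitive-decision-making", "collaborative-proposal",
   "flexible-pricing", "co-operative-decision-making", "no-strategy"]

-- one step of B's forward pass: overwrite the accumulator on a word containing any key
def pvStepB (keys : List String) (result w : String) : String :=
  if keys.any (fun k => PySem.Str.isIn k w) then
    match keys.find? (fun k => PySem.Str.isIn k w &&
        ((PySem.Str.split? k "_").getD []).length == ((PySem.Str.split? w "_").getD []).length) with
    | some k => k
    | none => "NA"
  else result

def get_predicted_strategy_alt (sent3 : String) (role_id : Int) : String :=
  let words := ((PySem.Str.split? (PySem.Str.lower (PySem.Str.slice sent3 (some (PySem.Str.find sent3 "next")) none)) " ").getD []).map PySem.Str.strip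
  words.foldl (pvStepB pvKeysB) "NA"

-- ===== PRECONDITION & SPEC =====
def Spec_get_predicted_strategy (sent3 : String) (role_id : Int) (out : String) : Prop := out = get_predicted_strategy_alt sent3 role_id
instance (sent3 : String) (role_id : Int) (out : String) : Decidable (Spec_get_predicted_strategy sent3 role_id out) := by unfold Spec_get_predicted_strategy; infer_instance

-- ===== CLAIM (what is proved, stated in full; the proofs are below) =====
def Claim_equal_get_predicted_strategy : Prop := ∀ (sent3 : String) (role_id : Int), Dom_get_predicted_strategy sent3 role_id → Spec_get_predicted_strategy sent3 role_id (get_predicted_strategy sent3 role_id)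

-- ===== LEMMAS AND PROOFS =====

-- the per-word predicate ("some key is a substring") and result ("the key the inner break picks")
def pvHit (keys : List String) (w : String) : Bool := keys.any (fun k => PySem.Str.isIn k w)
def pvPred (w : String) (k : String) : Bool :=
  PySem.Str.isIn k w &&
    ((PySem.Str.split? k "_").getD []).length == ((PySem.Str.split? w "_").getD []).length

def pvPick (keys : List String) (w : String) : String :=
  match keys.find? (pvPred w) with
  | some k => k
  | none => "NA"

lemma pvHit_false_find?_none {keys : List String} {w : String} (h : pvHit keys w = false) :
    keys.find? (pvPred w) = none := by
  rw [List.find?_eq_none]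
  intro k hk
  simp only [pvHit, List.any_eq_false] at h
  have hi := h k hk
  simp only [Bool.not_eq_true] at hi
  have hi' : PySem.Chars.isIn k.toList w.toList = false := hi
  simp [pvPred, hi']

lemma pvInnerA_eq (ele : String) (flag : Bool) (keys : List String) :
    pvInnerA ele flag keys = (flag || pvHit keys ele, keys.find? (pvPred ele)) := by
  induction keys generalizing flag with
  | nil => simp [pvInnerA, pvHit]
  | cons k ks ih =>
      rw [pvInnerA]
      cases h1 : PySem.Str.isIn k ele with
      | true =>
          rw [if_pos rfl]
          by_cases h2 : ((PySem.Str.split? k "_").getD []).length = ((PySem.Str.split? ele "_").getD []).length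
          · rw [if_pos h2, List.find?_cons_of_pos (by unfold pvPred; rw [h1]; simp [h2])]
            simp [pvHit]
            exact Or.inr (Or.inl (h1 : PySem.Chars.isIn k.toList ele.toList = true))
          · rw [if_neg h2, ih, List.find?_cons_of_neg (by unfold pvPred; rw [h1]; simp [h2])]
            simp [pvHit]
            exact Or.inr (Or.inl (h1 : PySem.Chars.isIn k.toList ele.toList = true))
      | false =>
          rw [if_neg (by simp), ih, List.find?_cons_of_neg (by unfold pvPred; rw [h1]; simp)]
          have h1' : PySem.Chars.isIn k.toList ele.toList = false := h1
          simp [pvHit, h1']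

lemma pvOuterA_eq (keys : List String) (l : List String) :
    pvOuterA keys false "NA" l =
      match l.find? (pvHit keys) with
      | some w => pvPick keys w
      | none => "NA" := by
  induction l with
  | nil => simp [pvOuterA]
  | cons w rest ih =>
      rw [pvOuterA, pvInnerA_eq]
      cases h : pvHit keys w with
      | true =>
          rw [List.find?_cons_of_pos h]
          simp [pvPick]
      | false =>
          rw [List.find?_cons_of_neg (by rw [h]; simp), pvHit_false_find?_none h]
          simpa using ih

lemma pvFoldB_eq (keys : List String) (l : List String) (s : String) :
    l.foldl (pvStepB keys) s =
      match l.reverse.find? (pvHit keys) with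
      | some w => pvPick keys w
      | none => s := by
  induction l generalizing s with
  | nil => simp
  | cons w rest ih =>
      rw [List.foldl_cons, ih, List.reverse_cons, List.find?_append]
      cases hr : rest.reverse.find? (pvHit keys) with
      | some w' => simp
      | none =>
          cases h : pvHit keys w with
          | true =>
              rw [List.find?_cons_of_pos h]
              have h' : (keys.any fun k => PySem.Str.isIn k w) = true := h
              simp only [Option.none_or, pvStepB, pvPick]
              rw [if_pos h']
              rfl
          | false =>
              rw [List.find?_cons_of_neg (by rw [h]; simp)]
              have h' : (keys.any fun k => PySem.Str.isIn k w) = false := h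
              simp only [Option.none_or, pvStepB, List.find?_nil]
              rw [if_neg (by rw [h']; simp)]

lemma pvKeys_eq (role_id : Int) :
    ((if role_id == 0 then pvTouristStrategy.map Prod.fst else pvAgentStrategy.map Prod.fst).map PySem.Str.lower) = pvKeysB := by
  by_cases h : role_id == 0 <;> simp [h, pvTouristStrategy, pvAgentStrategy, pvKeysB] <;> decide

-- ===== VERDICT (by name: the statement is the Claim_ definition above) =====
theorem get_predicted_strategy_spec : Claim_equal_get_predicted_strategy := by
  intro sent3 role_id _
  show get_predicted_strategy sent3 role_id = get_predicted_strategy_alt sent3 role_id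
  unfold get_predicted_strategy get_predicted_strategy_alt
  dsimp only
  rw [pvKeys_eq, pvOuterA_eq, pvFoldB_eq]
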